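-- pv_equiv track=rewrite | github.com/Kaleemulla/Kaleemulla_Projects | Tries/StringsOfStrings.py | stringsMadeUpOfStrings
-- ===== SOURCE A (Python) =====
-- def stringsMadeUpOfStrings(strings, substrings):
--     trie = Trie()
--     for substring in substrings:
--         trie.insert(substring)
--
--     solutions = []
--     for string in strings:
--         if isMadeUpOfStrings(string, 0, trie, {}):
--             solutions.append(string)
--
--     return solutions
--
-- def isMadeUpOfStrings(string, start, trie, memo):
--     if start == len(string):
--         return True
--     if start in memo:
--         return memo[start]
--
--     curr = trie.root
--     for i in range(start, len(string)):
--         ch = string[i]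
--         if ch not in curr:
--             break
--
--         curr = curr[ch]
--         if curr["isEndOfString"] and isMadeUpOfStrings(string, i+1, trie, memo):
--             memo[start] = True
--             return True
--
--     memo[start] = False
--
-- class Trie:
--     def __init__(self):
--         self.root = {"isEndOfString": False}
--
--     def insert(self, string):
--         curr = self.root
--
--         for i in range(len(string)):
--             if string[i] not in curr:
--                 curr[string[i]] = {"isEndOfString": False}
--             curr = curr[string[i]]
--         curr["isEndOfString"] = True
-- ===== SOURCE B (Python) =====
-- def stringsMadeUpOfStrings(strings, substrings):
--     subs = set(substrings)
--
--     def composable(s):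
--         n = len(s)
--         dp = [False] * (n + 1)
--         dp[n] = True
--         for i in reversed(range(n)):
--             dp[i] = any(s[i:i + len(sub)] == sub and dp[i + len(sub)]
--                         for sub in subs)
--         return dp[0]
--
--     return [s for s in strings if composable(s)]
-- ===== Notes on version B (the rewrite author's own statement) =====
-- stated objective: simpler
-- what changed: Replaces the character trie plus memoized top-down recursion with a deduplicated substring set and a bottom-up boolean DP over cut positions (word-break DP), keeping the original string order.
import Mathlib
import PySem

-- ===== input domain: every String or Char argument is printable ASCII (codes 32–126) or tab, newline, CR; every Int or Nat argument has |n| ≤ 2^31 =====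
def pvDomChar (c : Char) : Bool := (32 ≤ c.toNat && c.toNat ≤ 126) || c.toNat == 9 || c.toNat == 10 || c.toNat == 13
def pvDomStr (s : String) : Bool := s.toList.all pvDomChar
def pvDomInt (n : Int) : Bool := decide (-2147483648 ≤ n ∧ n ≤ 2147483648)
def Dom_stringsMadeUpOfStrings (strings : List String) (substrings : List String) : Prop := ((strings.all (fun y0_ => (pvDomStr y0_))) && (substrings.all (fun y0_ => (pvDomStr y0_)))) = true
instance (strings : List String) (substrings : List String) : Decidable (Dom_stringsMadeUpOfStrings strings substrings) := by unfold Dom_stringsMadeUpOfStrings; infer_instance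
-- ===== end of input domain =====

-- B replaces A's character trie + memoized top-down recursion with a substring set and a
-- bottom-up word-break DP over cut positions; objective: simpler (no speed claim).

-- ===== PORT A =====
-- A's nested-dict trie is encoded as a path-indexed dictionary (node path ↦ isEndOfString):
-- 'ch in curr' becomes 'trie contains path ++ [ch]' (nested inductives are not available);
-- lookups/inserts are exactly the ones A performs, node by node.

-- Trie.insert's character loop: ensure each nonempty prefix node of `rest` exists (value False when new).
def pvTrieInsertLoop (T : PySem.Dict (List Char) Bool) (p : List Char) (rest : List Char) :
    PySem.Dict (List Char) Bool :=
  match rest with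
  | [] => T
  | c :: rs =>
      let p' := p ++ [c]
      let T' := if T.contains p' then T else T.insert p' false
      pvTrieInsertLoop T' p' rs

-- Trie.insert: run the loop from the root, then set the final node's end flag (path is [] ++ u = u).
def pvTrieInsert (T : PySem.Dict (List Char) Bool) (u : List Char) : PySem.Dict (List Char) Bool :=
  (pvTrieInsertLoop T [] u).insert u true

-- isMadeUpOfStrings: pvScan is its inner 'for i in range(start, len(string))' loop (p = current
-- trie path = string[start:i]); the memo write A does on both exits is done by the caller pvIsMade.
mutual
def pvScan (s : List Char) (trie : PySem.Dict (List Char) Bool) (p : List Char) (i : Nat)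
    (memo : PySem.Dict Nat Bool) : Bool × PySem.Dict Nat Bool :=
  if h : i < s.length then
    let ch := s.getD i ' '          -- string[i], in range here
    let p' := p ++ [ch]
    if trie.contains p' then
      if trie.getD p' false then
        let r := pvIsMade s trie (i + 1) memo
        if r.1 then (true, r.2)
        else pvScan s trie p' (i + 1) r.2
      else pvScan s trie p' (i + 1) memo
    else (false, memo)              -- break
  else (false, memo)                -- loop ran out
termination_by (s.length - i, 0)

def pvIsMade (s : List Char) (trie : PySem.Dict (List Char) Bool) (start : Nat)
    (memo : PySem.Dict Nat Bool) : Bool × PySem.Dict Nat Bool :=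
  if start = s.length then (true, memo)
  else
    match memo.get? start with
    | some b => (b, memo)
    | none =>
        let r := pvScan s trie [] start memo
        (r.1, r.2.insert start r.1)
termination_by (s.length - start, 1)
end

def stringsMadeUpOfStrings (strings : List String) (substrings : List String) : List String :=
  let trie := substrings.foldl (fun T sub => pvTrieInsert T sub.toList)
                (PySem.Dict.insert PySem.Dict.empty [] false)   -- root = {"isEndOfString": False}
  strings.foldl
    (fun sols s => if (pvIsMade s.toList trie 0 PySem.Dict.empty).1 then sols ++ [s] else sols) []

-- ===== PORT B =====
-- 's[i:i+len(sub)] == sub' ported on code points via PySem.List.slice (exact);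
-- len(sub) is the code-point count sub.toList.length.
-- one DP step: dp[i] = any(s[i:i+len(sub)] == sub and dp[i+len(sub)] for sub in subs)
def pvDP (subs : List String) (cs : List Char) (dp : List Bool) (i : Nat) : List Bool :=
  dp.set i (subs.any (fun sub =>
    (PySem.List.slice cs (some (i : Int)) (some ((i : Int) + (sub.toList.length : Int))) == sub.toList)
      && dp.getD (i + sub.toList.length) false))

def pvAltOk (subs : List String) (s : String) : Bool :=
  let cs := s.toList
  let n := cs.length
  let dp := (List.replicate (n + 1) false).set n true
  let dp := (List.range n).reverse.foldl (pvDP subs cs) dp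
  dp.getD 0 false

def stringsMadeUpOfStrings_alt (strings : List String) (substrings : List String) : List String :=
  let subs := PySem.Set.ofList substrings
  strings.filter (fun s => pvAltOk subs s)

-- ===== PRECONDITION & SPEC =====
def Spec_stringsMadeUpOfStrings (strings : List String) (substrings : List String) (out : List String) : Prop := out = stringsMadeUpOfStrings_alt strings substrings
instance (strings : List String) (substrings : List String) (out : List String) : Decidable (Spec_stringsMadeUpOfStrings strings substrings out) := by unfold Spec_stringsMadeUpOfStrings; infer_instance

-- ===== CLAIM (what is proved, stated in full; the proofs are below) =====
def Claim_equal_stringsMadeUpOfStrings : Prop := ∀ (strings : List String) (substrings : List String), Dom_stringsMadeUpOfStrings strings substrings → Spec_stringsMadeUpOfStrings strings substrings (stringsMadeUpOfStrings strings substrings)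

-- ===== LEMMAS AND PROOFS =====

-- w is a concatenation of nonempty members of subsL.
inductive PvComp (subsL : List (List Char)) : List Char → Prop
  | nil : PvComp subsL []
  | cons (u v : List Char) : u ∈ subsL → u ≠ [] → PvComp subsL v → PvComp subsL (u ++ v)

theorem pvComp_inv {subsL : List (List Char)} {w : List Char} (h : PvComp subsL w) (hne : w ≠ []) :
    ∃ u v, u ∈ subsL ∧ u ≠ [] ∧ w = u ++ v ∧ PvComp subsL v := by
  cases h with
  | nil => exact absurd rfl hne
  | cons u v hu hne' hv => exact ⟨u, v, hu, hne', rfl, hv⟩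

-- the slice string[start:j] (0 ≤ start ≤ j) as drop/take
def pvPiece (cs : List Char) (k j : Nat) : List Char := (cs.drop k).take (j - k)

-- ---- trie characterisation ----

def PvTrieInv (T : PySem.Dict (List Char) Bool) (L : List (List Char)) : Prop :=
  (∀ p, T.contains p = true ↔ (p = [] ∨ (p ≠ [] ∧ ∃ u ∈ L, p <+: u))) ∧
  (∀ p, T.getD p false = true ↔ p ∈ L)

theorem pvTrieInsertLoop_get? (rest : List Char) :
    ∀ (T : PySem.Dict (List Char) Bool) (p q : List Char),
      ((∃ r, r <+: rest ∧ r ≠ [] ∧ q = p ++ r) →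
          (pvTrieInsertLoop T p rest).get? q = some ((T.get? q).getD false)) ∧
      (¬ (∃ r, r <+: rest ∧ r ≠ [] ∧ q = p ++ r) →
          (pvTrieInsertLoop T p rest).get? q = T.get? q) := by
  induction rest with
  | nil =>
    intro T p q
    refine ⟨?_, fun _ => rfl⟩
    rintro ⟨r, hpre, hne, rfl⟩
    simp only [List.prefix_nil] at hpre
    exact absurd hpre hne
  | cons c rs ih =>
    intro T p q
    have hstep : pvTrieInsertLoop T p (c :: rs) =
        pvTrieInsertLoop (if T.contains (p ++ [c]) then T else T.insert (p ++ [c]) false)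
          (p ++ [c]) rs := rfl
    set p' := p ++ [c] with hp'
    set T' := if T.contains p' then T else T.insert p' false with hT'def
    have hT'p' : T'.get? p' = some ((T.get? p').getD false) := by
      by_cases h : T.contains p' = true
      · rw [PySem.Dict.contains_eq_isSome_get?] at h
        obtain ⟨v, hv⟩ := Option.isSome_iff_exists.mp h
        rw [PySem.Dict.contains_eq_isSome_get?] at hT'def
        simp [hT'def, hv]
      · have hnone : T.get? p' = none := by
          rw [PySem.Dict.contains_eq_isSome_get?] at h
          cases hv : T.get? p' with
          | none => rfl
          | some v => rw [hv] at h; simp at h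
        simp [hT'def, PySem.Dict.contains_eq_isSome_get?, hnone,
          PySem.Dict.get?_insert_self]
    have hT'ne : ∀ q', q' ≠ p' → T'.get? q' = T.get? q' := by
      intro q' hq'
      by_cases h : T.contains p' = true
      · simp [hT'def, h]
      · simp only [hT'def, h, Bool.false_eq_true, if_false]
        exact PySem.Dict.get?_insert_of_ne T false hq' 
    rw [hstep]
    by_cases hq : q = p'
    · subst hq
      have hno : ¬ ∃ r', r' <+: rs ∧ r' ≠ [] ∧ p' = p' ++ r' := by
        rintro ⟨r', _, hne, habs⟩
        exact hne (by simpa using habs.symm)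
      have hloop := (ih T' p' p').2 hno
      refine ⟨fun _ => ?_, fun hcon => ?_⟩
      · rw [hloop, hT'p']
      · exact absurd ⟨[c], by simp, by simp, by simp [hp']⟩ hcon
    · by_cases hex : ∃ r', r' <+: rs ∧ r' ≠ [] ∧ q = p' ++ r'
      · have hloop := (ih T' p' q).1 hex
        refine ⟨fun _ => ?_, fun hcon => ?_⟩
        · rw [hloop, hT'ne q hq]
        · obtain ⟨r', h1, h2, h3⟩ := hex
          exact absurd ⟨c :: r', List.cons_prefix_cons.mpr ⟨rfl, h1⟩, by simp,
            by simp [h3, hp', List.append_assoc]⟩ hcon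
      · have hloop := (ih T' p' q).2 hex
        refine ⟨?_, fun _ => by rw [hloop, hT'ne q hq]⟩
        rintro ⟨r, hpre, hne, rfl⟩
        cases r with
        | nil => exact absurd rfl hne
        | cons c0 r'' =>
          obtain ⟨hc0, hpre'⟩ := List.cons_prefix_cons.mp hpre
          subst hc0
          by_cases h'' : r'' = []
          · subst h''
            exact absurd rfl hq
          · exact absurd ⟨r'', hpre', h'', by simp [hp', List.append_assoc]⟩ hex

theorem pvTrieInv_insert {T : PySem.Dict (List Char) Bool} {L : List (List Char)}
    (h : PvTrieInv T L) (u : List Char) : PvTrieInv (pvTrieInsert T u) (L ++ [u]) := by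
  obtain ⟨hc, hv⟩ := h
  have hloop := pvTrieInsertLoop_get? u T []
  constructor
  · intro q
    rw [PySem.Dict.contains_eq_isSome_get?]
    by_cases hqu : q = u
    · subst hqu
      rw [pvTrieInsert, PySem.Dict.get?_insert_self]
      simp only [Option.isSome_some, true_iff]
      by_cases hu : q = []
      · exact Or.inl hu
      · exact Or.inr ⟨hu, q, by simp, List.prefix_refl q⟩
    · rw [pvTrieInsert, PySem.Dict.get?_insert_of_ne _ true hqu]
      by_cases hC : ∃ r, r <+: u ∧ r ≠ [] ∧ q = [] ++ r
      · rw [(hloop q).1 hC]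
        simp only [Option.isSome_some, true_iff]
        obtain ⟨r, hpre, hne, hq⟩ := hC
        simp only [List.nil_append] at hq
        subst hq
        exact Or.inr ⟨hne, u, by simp, hpre⟩
      · rw [(hloop q).2 hC, ← PySem.Dict.contains_eq_isSome_get?, hc q]
        constructor
        · rintro (h0 | ⟨hne, v, hvL, hpre⟩)
          · exact Or.inl h0
          · exact Or.inr ⟨hne, v, by simp [hvL], hpre⟩
        · rintro (h0 | ⟨hne, v, hvL, hpre⟩)
          · exact Or.inl h0
          · rcases List.mem_append.mp hvL with hvL' | hvu
            · exact Or.inr ⟨hne, v, hvL', hpre⟩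
            · simp only [List.mem_singleton] at hvu
              subst hvu
              exact absurd ⟨q, hpre, hne, by simp⟩ hC
  · intro q
    rw [PySem.Dict.getD_eq_get?_getD]
    by_cases hqu : q = u
    · subst hqu
      rw [pvTrieInsert, PySem.Dict.get?_insert_self]
      simp
    · rw [pvTrieInsert, PySem.Dict.get?_insert_of_ne _ true hqu]
      have hvq := hv q
      rw [PySem.Dict.getD_eq_get?_getD] at hvq
      by_cases hC : ∃ r, r <+: u ∧ r ≠ [] ∧ q = [] ++ r
      · rw [(hloop q).1 hC]
        simp only [Option.getD_some]
        rw [hvq]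
        simp [hqu]
      · rw [(hloop q).2 hC, hvq]
        simp [hqu]

theorem pvTrieInv_build (substrings : List String) :
    PvTrieInv (substrings.foldl (fun T sub => pvTrieInsert T sub.toList)
        (PySem.Dict.insert PySem.Dict.empty [] false))
      (substrings.map String.toList) := by
  have hroot : PvTrieInv (PySem.Dict.insert PySem.Dict.empty [] false) [] := by
    constructor
    · intro q
      rw [PySem.Dict.contains_eq_isSome_get?]
      by_cases hq : q = ([] : List Char)
      · subst hq
        rw [PySem.Dict.get?_insert_self]
        simp
      · rw [PySem.Dict.get?_insert_of_ne _ false hq]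
        simp [PySem.Dict.get?_empty, hq]
    · intro q
      rw [PySem.Dict.getD_eq_get?_getD]
      by_cases hq : q = ([] : List Char)
      · subst hq
        rw [PySem.Dict.get?_insert_self]
        simp
      · rw [PySem.Dict.get?_insert_of_ne _ false hq]
        simp [PySem.Dict.get?_empty]
  have hgen : ∀ (subs : List String) (T : PySem.Dict (List Char) Bool) (L : List (List Char)),
      PvTrieInv T L →
      PvTrieInv (subs.foldl (fun T sub => pvTrieInsert T sub.toList) T) (L ++ subs.map String.toList) := by
    intro subs
    induction subs with
    | nil => intro T L h; simpa using h
    | cons s ss ih =>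
      intro T L h
      have := ih (pvTrieInsert T s.toList) (L ++ [s.toList]) (pvTrieInv_insert h s.toList)
      simpa [List.append_assoc] using this
  simpa using hgen substrings _ [] hroot

theorem pvPiece_self (cs : List Char) (k : Nat) : pvPiece cs k k = [] := by
  simp [pvPiece]

theorem pvPiece_succ {cs : List Char} {start i : Nat} (h1 : start ≤ i) (h2 : i < cs.length) :
    pvPiece cs start i ++ [cs.getD i ' '] = pvPiece cs start (i + 1) := by
  unfold pvPiece
  rw [show i + 1 - start = (i - start) + 1 by omega, List.take_add_one]
  congr 1
  rw [List.getElem?_drop, show start + (i - start) = i by omega,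
    List.getD_eq_getElem?_getD, List.getElem?_eq_getElem h2]
  simp

theorem pvPiece_prefix (cs : List Char) {start i j : Nat} (h : i ≤ j) :
    pvPiece cs start i <+: pvPiece cs start j := by
  unfold pvPiece
  have heq : (cs.drop start).take (i - start) = ((cs.drop start).take (j - start)).take (i - start) := by
    rw [List.take_take]
    congr 1
    omega
  rw [heq]
  exact List.take_prefix _ _

theorem pvPiece_length {cs : List Char} {start j : Nat} (h1 : start ≤ j) (h2 : j ≤ cs.length) :
    (pvPiece cs start j).length = j - start := by
  simp only [pvPiece, List.length_take, List.length_drop]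
  omega

theorem pvPiece_ne_nil {cs : List Char} {start j : Nat} (h1 : start < j) (h2 : j ≤ cs.length) :
    pvPiece cs start j ≠ [] := by
  intro h0
  have := congrArg List.length h0
  rw [pvPiece_length (by omega) h2] at this
  simp at this
  omega

theorem pvPiece_append_drop {cs : List Char} {start j : Nat} (h1 : start ≤ j) (_h2 : j ≤ cs.length) :
    pvPiece cs start j ++ cs.drop j = cs.drop start := by
  unfold pvPiece
  have h := List.take_append_drop (j - start) (cs.drop start)
  rw [List.drop_drop, show start + (j - start) = j by omega] at h
  exact h

theorem pvPiece_of_append {cs u v : List Char} {start : Nat}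
    (h : cs.drop start = u ++ v) (hs : start ≤ cs.length) :
    start + u.length ≤ cs.length ∧ pvPiece cs start (start + u.length) = u ∧
      cs.drop (start + u.length) = v := by
  have hlen := congrArg List.length h
  simp only [List.length_drop, List.length_append] at hlen
  refine ⟨by omega, ?_, ?_⟩
  · unfold pvPiece
    rw [show start + u.length - start = u.length by omega, h, List.take_left]
  · have hdd : cs.drop (start + u.length) = (cs.drop start).drop u.length := by
      rw [List.drop_drop]
      try congr 1
      try omega
    rw [hdd, h, List.drop_left]

theorem pvComp_drop_iff {subsL : List (List Char)} {cs : List Char} {start : Nat}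
    (h : start < cs.length) :
    PvComp subsL (cs.drop start) ↔
      ∃ j, start < j ∧ j ≤ cs.length ∧ pvPiece cs start j ∈ subsL ∧
        PvComp subsL (cs.drop j) := by
  constructor
  · intro hcomp
    have hne : cs.drop start ≠ [] := by
      simp only [ne_eq, List.drop_eq_nil_iff]
      omega
    obtain ⟨u, v, huL, hune, heq, hv⟩ := pvComp_inv hcomp hne
    obtain ⟨h1, h2, h3⟩ := pvPiece_of_append heq (le_of_lt h)
    have hupos : 0 < u.length := List.length_pos_of_ne_nil hune
    exact ⟨start + u.length, by omega, h1, by rw [h2]; exact huL, by rw [h3]; exact hv⟩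
  · rintro ⟨j, hj1, hj2, hmem, hcomp⟩
    rw [← pvPiece_append_drop (le_of_lt hj1) hj2]
    exact PvComp.cons _ _ hmem (pvPiece_ne_nil hj1 hj2) hcomp

-- ---- A's memoized search ----

def PvMemoOK (subsL : List (List Char)) (cs : List Char) (memo : PySem.Dict Nat Bool) : Prop :=
  ∀ k b, memo.get? k = some b → (b = true ↔ PvComp subsL (cs.drop k))

theorem pvIsMade_spec (subsL : List (List Char)) (cs : List Char)
    (T : PySem.Dict (List Char) Bool) (hT : PvTrieInv T subsL) :
    ∀ start memo, start ≤ cs.length → PvMemoOK subsL cs memo →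
      PvMemoOK subsL cs (pvIsMade cs T start memo).2 ∧
        ((pvIsMade cs T start memo).1 = true ↔ PvComp subsL (cs.drop start)) := by
  obtain ⟨hTc, hTv⟩ := hT
  suffices H : ∀ d start memo, cs.length - start ≤ d → start ≤ cs.length → PvMemoOK subsL cs memo →
      PvMemoOK subsL cs (pvIsMade cs T start memo).2 ∧
        ((pvIsMade cs T start memo).1 = true ↔ PvComp subsL (cs.drop start)) by
    intro start memo h1 h2
    exact H (cs.length - start) start memo le_rfl h1 h2
  intro d
  induction d with
  | zero =>
    intro start memo hle hstart hmemo
    have hsn : start = cs.length := by omega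
    subst hsn
    rw [pvIsMade, if_pos rfl]
    exact ⟨hmemo, by simp only [List.drop_length]; exact ⟨fun _ => PvComp.nil, fun _ => trivial⟩⟩
  | succ d ihd =>
    intro start memo hle hstart hmemo
    by_cases hsn : start = cs.length
    · subst hsn
      rw [pvIsMade, if_pos rfl]
      exact ⟨hmemo, by simp only [List.drop_length]; exact ⟨fun _ => PvComp.nil, fun _ => trivial⟩⟩
    have hslt : start < cs.length := lt_of_le_of_ne hstart hsn
    have hscan : ∀ e i p memo', cs.length - i ≤ e → start ≤ i → i ≤ cs.length →
        p = pvPiece cs start i → PvMemoOK subsL cs memo' →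
        PvMemoOK subsL cs (pvScan cs T p i memo').2 ∧
          ((pvScan cs T p i memo').1 = true ↔
            ∃ j, i < j ∧ j ≤ cs.length ∧ pvPiece cs start j ∈ subsL ∧
              PvComp subsL (cs.drop j)) := by
      intro e
      induction e with
      | zero =>
        intro i p memo' he hsi hin hp hm
        have hin' : ¬ i < cs.length := by omega
        rw [pvScan, dif_neg hin']
        refine ⟨hm, ?_, ?_⟩
        · intro habs
          simp at habs
        · rintro ⟨j, h1, h2, _⟩
          omega
      | succ e ihe =>
        intro i p memo' he hsi hin hp hm
        by_cases hilt : i < cs.length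
        case neg =>
          rw [pvScan, dif_neg hilt]
          refine ⟨hm, ?_, ?_⟩
          · intro habs
            simp at habs
          · rintro ⟨j, h1, h2, _⟩
            omega
        rw [pvScan, dif_pos hilt]
        have hp' : p ++ [cs.getD i ' '] = pvPiece cs start (i + 1) := by
          rw [hp]
          exact pvPiece_succ hsi hilt
        by_cases hcont : T.contains (p ++ [cs.getD i ' ']) = true
        case neg =>
          rw [if_neg hcont]
          refine ⟨hm, ?_, ?_⟩
          · intro habs
            simp at habs
          · rintro ⟨j, h1, h2, h3, _⟩
            have hpre : pvPiece cs start (i + 1) <+: pvPiece cs start j :=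
              pvPiece_prefix cs (by omega)
            have hne : pvPiece cs start (i + 1) ≠ [] := pvPiece_ne_nil (by omega) (by omega)
            have habs : T.contains (p ++ [cs.getD i ' ']) = true := by
              rw [hp']
              exact (hTc _).mpr (Or.inr ⟨hne, _, h3, hpre⟩)
            exact absurd habs hcont
        rw [if_pos hcont]
        by_cases hend : T.getD (p ++ [cs.getD i ' ']) false = true
        · rw [if_pos hend]
          have hmem1 : pvPiece cs start (i + 1) ∈ subsL := by
            rw [← hp']
            exact (hTv _).mp hend
          have hrec := ihd (i + 1) memo' (by omega) (by omega) hm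
          by_cases hr : (pvIsMade cs T (i + 1) memo').1 = true
          · simp only [hr, if_true]
            refine ⟨hrec.1, fun _ => ⟨i + 1, by omega, by omega, hmem1, hrec.2.mp hr⟩,
              fun _ => by simp⟩
          · have hrf : (pvIsMade cs T (i + 1) memo').1 = false := by
              revert hr
              cases (pvIsMade cs T (i + 1) memo').1 <;> simp
            simp only [hrf, Bool.false_eq_true, if_false]
            have hsc := ihe (i + 1) (p ++ [cs.getD i ' ']) (pvIsMade cs T (i + 1) memo').2
              (by omega) (by omega) (by omega) hp' hrec.1
            refine ⟨hsc.1, ?_⟩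
            rw [hsc.2]
            constructor
            · rintro ⟨j, h1, h2, h3, h4⟩
              exact ⟨j, by omega, h2, h3, h4⟩
            · rintro ⟨j, h1, h2, h3, h4⟩
              by_cases hji : j = i + 1
              · subst hji
                exact absurd (hrec.2.mpr h4) (by simp [hrf])
              · exact ⟨j, by omega, h2, h3, h4⟩
        · rw [if_neg hend]
          have hsc := ihe (i + 1) (p ++ [cs.getD i ' ']) memo'
            (by omega) (by omega) (by omega) hp' hm
          refine ⟨hsc.1, ?_⟩
          rw [hsc.2]
          constructor
          · rintro ⟨j, h1, h2, h3, h4⟩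
            exact ⟨j, by omega, h2, h3, h4⟩
          · rintro ⟨j, h1, h2, h3, h4⟩
            by_cases hji : j = i + 1
            · subst hji
              have : T.getD (p ++ [cs.getD i ' ']) false = true := by
                rw [hp']
                exact (hTv _).mpr h3
              exact absurd this hend
            · exact ⟨j, by omega, h2, h3, h4⟩
    rw [pvIsMade, if_neg hsn]
    cases hmo : memo.get? start with
    | some b =>
      exact ⟨hmemo, hmemo start b hmo⟩
    | none =>
      have hs := hscan (cs.length - start) start [] memo le_rfl le_rfl hstart
        (pvPiece_self cs start).symm hmemo
      have hiff : (pvScan cs T [] start memo).1 = true ↔ PvComp subsL (cs.drop start) := by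
        rw [hs.2]
        exact (pvComp_drop_iff hslt).symm
      refine ⟨?_, hiff⟩
      intro k b hk
      by_cases hks : k = start
      · subst hks
        rw [PySem.Dict.get?_insert_self] at hk
        have hb : b = (pvScan cs T [] k memo).1 := by
          injection hk with h'
          exact h'.symm
        rw [hb]
        exact hiff
      · rw [PySem.Dict.get?_insert_of_ne _ _ hks] at hk
        exact hs.1 k b hk

-- ---- B's DP ----

theorem pvAlt_fold_spec (substrings : List String) (cs : List Char) :
    ∀ (m i0 : Nat), i0 + m = cs.length →
      (((List.range' i0 m).reverse.foldl (pvDP (PySem.Set.ofList substrings) cs)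
          ((List.replicate (cs.length + 1) false).set cs.length true)).length = cs.length + 1) ∧
      ∀ k, k ≤ cs.length →
        (((List.range' i0 m).reverse.foldl (pvDP (PySem.Set.ofList substrings) cs)
            ((List.replicate (cs.length + 1) false).set cs.length true)).getD k false = true ↔
          (i0 ≤ k ∧ PvComp (substrings.map String.toList) (cs.drop k))) := by
  intro m
  induction m with
  | zero =>
    intro i0 h0
    have hi0 : i0 = cs.length := by omega
    simp only [List.range'_zero, List.reverse_nil, List.foldl_nil]
    refine ⟨by simp, ?_⟩
    intro k hk
    rw [List.getD_eq_getElem?_getD, List.getElem?_set]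
    by_cases hkn : cs.length = k
    · rw [if_pos hkn, if_pos (by simp : cs.length < (List.replicate (cs.length + 1) false).length)]
      simp only [Option.getD_some]
      constructor
      · intro _
        refine ⟨by omega, ?_⟩
        rw [← hkn, List.drop_length]
        exact PvComp.nil
      · intro _
        trivial
    · rw [if_neg hkn, List.getElem?_replicate, if_pos (by omega : k < cs.length + 1)]
      simp only [Option.getD_some]
      constructor
      · intro habs
        simp at habs
      · rintro ⟨h1, _⟩
        omega
  | succ m ihm =>
    intro i0 h0
    obtain ⟨hlen, hinv⟩ := ihm (i0 + 1) (by omega)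
    have hi0n : i0 < cs.length := by omega
    rw [List.range'_succ, List.reverse_cons, List.foldl_append, List.foldl_cons, List.foldl_nil]
    set dpP := (List.range' (i0 + 1) m).reverse.foldl (pvDP (PySem.Set.ofList substrings) cs)
      ((List.replicate (cs.length + 1) false).set cs.length true) with hdpP
    have hany : ((PySem.Set.ofList substrings).any fun sub =>
        (PySem.List.slice cs (some (i0 : Int)) (some ((i0 : Int) + (sub.toList.length : Int)))
            == sub.toList) && dpP.getD (i0 + sub.toList.length) false) = true ↔
        PvComp (substrings.map String.toList) (cs.drop i0) := by
      constructor
      · intro h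
        obtain ⟨sub, hsubmem, hcond⟩ := List.any_eq_true.mp h
        rw [Bool.and_eq_true] at hcond
        obtain ⟨hslice, hdp⟩ := hcond
        rw [beq_iff_eq, PySem.List.slice_natCast_add] at hslice
        by_cases hemp : sub.toList = []
        · rw [hemp] at hdp
          simp only [List.length_nil, Nat.add_zero] at hdp
          have := (hinv i0 (by omega)).mp hdp
          omega
        · have hLpos : 0 < sub.toList.length := List.length_pos_of_ne_nil hemp
          have hlensl := congrArg List.length hslice
          simp only [List.length_take, List.length_drop] at hlensl
          have hjn : i0 + sub.toList.length ≤ cs.length := by omega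
          have hdp' := (hinv _ hjn).mp hdp
          have hsubmem' : sub ∈ substrings := (PySem.Set.mem_ofList substrings sub).mp hsubmem
          rw [← pvPiece_append_drop (show i0 ≤ i0 + sub.toList.length by omega) hjn]
          have hpiece : pvPiece cs i0 (i0 + sub.toList.length) = sub.toList := by
            unfold pvPiece
            rw [show i0 + sub.toList.length - i0 = sub.toList.length by omega]
            exact hslice
          rw [hpiece]
          exact PvComp.cons _ _ (List.mem_map_of_mem hsubmem') hemp hdp'.2
      · intro hcomp
        have hne : cs.drop i0 ≠ [] := by
          simp only [ne_eq, List.drop_eq_nil_iff]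
          omega
        obtain ⟨u, v, huL, hune, heq, hv⟩ := pvComp_inv hcomp hne
        obtain ⟨h1, h2, h3⟩ := pvPiece_of_append heq (by omega)
        obtain ⟨sub, hsubmem, hsubeq⟩ := List.mem_map.mp huL
        subst hsubeq
        apply List.any_eq_true.mpr
        refine ⟨sub, (PySem.Set.mem_ofList substrings sub).mpr hsubmem, ?_⟩
        rw [Bool.and_eq_true]
        constructor
        · rw [beq_iff_eq, PySem.List.slice_natCast_add]
          have h2' := h2
          unfold pvPiece at h2'
          rw [show i0 + sub.toList.length - i0 = sub.toList.length by omega] at h2'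
          exact h2'
        · have hupos : 0 < sub.toList.length := List.length_pos_of_ne_nil hune
          exact (hinv _ h1).mpr ⟨by omega, by rw [h3]; exact hv⟩
    refine ⟨?_, ?_⟩
    · simp only [pvDP, List.length_set]
      exact hlen
    · intro k hk
      simp only [pvDP]
      rw [List.getD_eq_getElem?_getD, List.getElem?_set]
      by_cases hki : i0 = k
      · subst hki
        rw [if_pos rfl, if_pos (by rw [hlen]; omega : i0 < dpP.length)]
        simp only [Option.getD_some]
        constructor
        · intro hb
          exact ⟨le_refl _, hany.mp hb⟩
        · rintro ⟨_, hc⟩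
          exact hany.mpr hc
      · rw [if_neg hki, ← List.getD_eq_getElem?_getD, hinv k hk]
        constructor
        · rintro ⟨h1, h2⟩
          exact ⟨by omega, h2⟩
        · rintro ⟨h1, h2⟩
          exact ⟨by omega, h2⟩

theorem pvAltOk_spec (substrings : List String) (s : String) :
    pvAltOk (PySem.Set.ofList substrings) s = true ↔
      PvComp (substrings.map String.toList) s.toList := by
  have h := pvAlt_fold_spec substrings s.toList s.toList.length 0 (by omega)
  simp only [pvAltOk]
  rw [List.range_eq_range', h.2 0 (Nat.zero_le _)]
  simp

-- ===== VERDICT (by name: the statement is the Claim_ definition above) =====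
theorem stringsMadeUpOfStrings_spec : Claim_equal_stringsMadeUpOfStrings := by
  intro strings substrings _
  unfold Spec_stringsMadeUpOfStrings stringsMadeUpOfStrings stringsMadeUpOfStrings_alt
  rw [PySem.List.foldl_append_if_eq_filter]
  simp only [List.nil_append]
  apply List.filter_congr
  intro s _
  have hA := (pvIsMade_spec (substrings.map String.toList) s.toList _
      (pvTrieInv_build substrings) 0 PySem.Dict.empty (Nat.zero_le _)
      (by intro k b hk; simp [PySem.Dict.get?_empty] at hk)).2
  have hB := pvAltOk_spec substrings s
  simp only [List.drop_zero] at hA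
  rw [Bool.eq_iff_iff, hA, ← hB]
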